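-- pv_equiv track=rewrite | github.com/martees/Video_analysis_PhD_2022 | analysis.py | select_transits
-- ===== SOURCE A (Python) =====
-- def select_transits(list_of_transits, list_of_visits, to_same_patch=False, to_different_patch=False):
--     """
--     Function that will take a transit and visit list, and return a new transit list following some property.
--         to_same_patch: will return transits that go from a patch to itself
--         to_different_patch: will return transits that go from a patch to another
--     """
--     # Event structure = [x,y,z] with x start of event, y end of event and z patch where the worm is (-1 for outside)
--     # Sometimes there are multiple successive visits / transits, so I use while loop to go through them.
--
--     # Fuse the two lists, and sort them depending on the time when they begin
--     list_of_events = list_of_transits + list_of_visits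
--     list_of_events.sort(key=lambda x: x[0])
--     new_list_of_transits = []
--     current_transit_index = 0
--
--     # If the list starts with a transit, skip it
--     if list_of_events[0][2] == -1:
--         while list_of_events[current_transit_index][2] == -1 and current_transit_index < len(list_of_events) - 1:
--             current_transit_index += 1
--         # At this point current_transit_index should be pointing to a visit but it's okay
--
--     # Then go through the whole list
--     while current_transit_index < len(list_of_events) - 1:
--         # Look for a transit
--         while current_transit_index < len(list_of_events) - 1 and list_of_events[current_transit_index][2] != -1:
--             current_transit_index += 1
--
--         # If a transit was found
--         if list_of_events[current_transit_index][2] == -1: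
--             # Current_transit_index is the first transit found, so it its preceded by a visit
--             previous_visit_location = list_of_events[current_transit_index - 1][2]
--             # Look for the next visit
--             next_visit_index = current_transit_index + 1
--             while next_visit_index < len(list_of_events) and list_of_events[next_visit_index][2] == -1:
--                 next_visit_index += 1
--             # If a visit was found
--             if next_visit_index != len(list_of_events):
--                 # Check where this next visit is happening
--                 next_visit_location = list_of_events[next_visit_index][2]
--                 # Fill the new transit list accordingly
--                 if to_same_patch and previous_visit_location == next_visit_location:
--                     new_list_of_transits += list_of_events[current_transit_index:next_visit_index]
--                 if to_different_patch and previous_visit_location != next_visit_location: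
--                     new_list_of_transits += list_of_events[current_transit_index:next_visit_index]
--             # Next transit is at least after the next visit
--             current_transit_index = next_visit_index + 1
--
--         # Else if no transit was found it means it's over so do nothin'
--
--     return new_list_of_transits
-- ===== SOURCE B (Python) =====
-- def select_transits(list_of_transits, list_of_visits, to_same_patch=False, to_different_patch=False):
--     """One-pass state machine over the time-sorted events: buffer transit runs,
--     flush them on the next visit according to the same/different-patch flags."""
--     list_of_events = sorted(list_of_transits + list_of_visits, key=lambda x: x[0])
--     new_list_of_transits = []
--     last_visit_location = None
--     buffer = []
--     for event in list_of_events: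
--         patch = event[2]
--         if patch == -1:
--             buffer.append(event)
--         else:
--             if buffer and last_visit_location is not None:
--                 if (to_same_patch and last_visit_location == patch) or \
--                    (to_different_patch and last_visit_location != patch):
--                     new_list_of_transits += buffer
--             buffer = []
--             last_visit_location = patch
--     return new_list_of_transits
-- ===== Notes on version B (the rewrite author's own statement) =====
-- stated objective: simpler
-- what changed: Replaces A's index-juggling nested while loops (skip prologue, transit scan, visit scan, slice appends) by a single forward for-loop state machine that keeps the last visit's patch and a buffer of pending transits, flushed at each visit.
import Mathlib
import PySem

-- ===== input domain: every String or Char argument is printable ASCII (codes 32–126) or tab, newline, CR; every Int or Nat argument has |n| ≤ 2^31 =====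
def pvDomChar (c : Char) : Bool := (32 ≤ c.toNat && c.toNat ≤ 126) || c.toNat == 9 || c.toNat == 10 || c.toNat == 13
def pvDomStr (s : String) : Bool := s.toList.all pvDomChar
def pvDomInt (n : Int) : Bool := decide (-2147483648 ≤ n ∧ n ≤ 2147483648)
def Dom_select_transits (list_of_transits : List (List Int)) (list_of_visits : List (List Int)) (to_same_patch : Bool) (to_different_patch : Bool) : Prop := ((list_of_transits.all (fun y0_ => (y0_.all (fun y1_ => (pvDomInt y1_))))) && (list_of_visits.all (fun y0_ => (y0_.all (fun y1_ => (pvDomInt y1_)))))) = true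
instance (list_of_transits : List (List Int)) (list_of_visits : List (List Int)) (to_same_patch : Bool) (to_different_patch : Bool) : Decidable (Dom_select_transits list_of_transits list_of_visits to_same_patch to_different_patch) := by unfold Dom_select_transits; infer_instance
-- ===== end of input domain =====

-- B replaces A's index-juggling nested while loops by one forward pass keeping the last
-- visit's patch and a buffer of pending transits (objective: simpler; same cost).

-- ===== PORT A =====
-- list_of_events[i][2]  (Python indexing; the default is only reached where Python would raise, outside Pre_)
def pvPatchA (list_of_events : List (List Int)) (i : Int) : Int :=
  PySem.List.pyGetD (PySem.List.pyGetD list_of_events i []) 2 0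

-- the initial "skip leading transits" while loop (fuel = list length bounds the iterations;
-- it is never exhausted, the loop advances the index towards the end each step)
def pvSkipA (list_of_events : List (List Int)) : Nat → Nat → Nat
  | 0, i => i
  | fuel + 1, i =>
    if pvPatchA list_of_events (i : Int) = -1 ∧ i < list_of_events.length - 1 then
      pvSkipA list_of_events fuel (i + 1)
    else i

-- the inner "look for a transit" while loop
def pvFindT (list_of_events : List (List Int)) : Nat → Nat → Nat
  | 0, i => i
  | fuel + 1, i =>
    if i < list_of_events.length - 1 ∧ pvPatchA list_of_events (i : Int) ≠ -1 then
      pvFindT list_of_events fuel (i + 1)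
    else i

-- the inner "look for the next visit" while loop
def pvFindV (list_of_events : List (List Int)) : Nat → Nat → Nat
  | 0, j => j
  | fuel + 1, j =>
    if j < list_of_events.length ∧ pvPatchA list_of_events (j : Int) = -1 then
      pvFindV list_of_events fuel (j + 1)
    else j

-- the outer while loop of A (fuel = list length again: every iteration moves the index
-- forward by at least two, so the fuel is never exhausted)
def pvMainA (L : List (List Int)) (same diff : Bool) : Nat → List (List Int) → Nat → List (List Int)
  | 0, acc, _ => acc
  | fuel + 1, acc, i =>
    if i < L.length - 1 then
      let c := pvFindT L L.length i
      if pvPatchA L (c : Int) = -1 then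
        let prev := pvPatchA L ((c : Int) - 1)
        let j := pvFindV L L.length (c + 1)
        let acc2 :=
          if j ≠ L.length then
            let nv := pvPatchA L (j : Int)
            let s := PySem.List.slice L (some (c : Int)) (some (j : Int))
            let acc1 := if same ∧ prev = nv then acc ++ s else acc
            if diff ∧ prev ≠ nv then acc1 ++ s else acc1
          else acc
        pvMainA L same diff fuel acc2 (j + 1)
      else acc
    else acc

def select_transits (list_of_transits : List (List Int)) (list_of_visits : List (List Int)) (to_same_patch : Bool) (to_different_patch : Bool) : List (List Int) :=
  let list_of_events :=
    PySem.List.sorted (list_of_transits ++ list_of_visits)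
      (fun x => PySem.List.pyGetD x 0 0) false
  let start :=
    if pvPatchA list_of_events 0 = -1 then pvSkipA list_of_events list_of_events.length 0
    else 0
  pvMainA list_of_events to_same_patch to_different_patch list_of_events.length [] start

-- ===== PORT B =====
-- event[2]
def pvPatchB (event : List Int) : Int := PySem.List.pyGetD event 2 0

-- B's single for loop: state = (last visit's patch, buffered transits, output)
def pvGoB (same diff : Bool) (events : List (List Int)) (last? : Option Int)
    (buffer out : List (List Int)) : List (List Int) :=
  match events with
  | [] => out
  | e :: rest =>
    let p := pvPatchB e
    if p = -1 then pvGoB same diff rest last? (buffer ++ [e]) out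
    else
      let out' :=
        if buffer ≠ [] then
          match last? with
          | some lastv =>
            if (same ∧ lastv = p) ∨ (diff ∧ lastv ≠ p) then out ++ buffer else out
          | none => out
        else out
      pvGoB same diff rest (some p) [] out'

def select_transits_alt (list_of_transits : List (List Int)) (list_of_visits : List (List Int)) (to_same_patch : Bool) (to_different_patch : Bool) : List (List Int) :=
  pvGoB to_same_patch to_different_patch
    (PySem.List.sorted (list_of_transits ++ list_of_visits)
      (fun x => PySem.List.pyGetD x 0 0) false)
    none [] []

-- ===== PRECONDITION & SPEC =====
-- Pre_ requires a nonempty combined event list whose events all have the [start, end, patch]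
-- shape (length ≥ 3): A raises IndexError on the empty list and on short events, except for a
-- few inputs whose single malformed trailing event is never inspected at index 2 — there A
-- returns while B raises, so those inputs are excluded too.
def Pre_select_transits (list_of_transits : List (List Int)) (list_of_visits : List (List Int)) (to_same_patch : Bool) (to_different_patch : Bool) : Prop :=
  list_of_transits ++ list_of_visits ≠ [] ∧
  ∀ e ∈ list_of_transits ++ list_of_visits, 3 ≤ e.length
instance (list_of_transits : List (List Int)) (list_of_visits : List (List Int)) (to_same_patch : Bool) (to_different_patch : Bool) : Decidable (Pre_select_transits list_of_transits list_of_visits to_same_patch to_different_patch) := by unfold Pre_select_transits; infer_instance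

def pvWitness_select_transits : List (List Int) × List (List Int) × Bool × Bool :=
  ([[1, 2, -1]], [[0, 0, 5], [3, 3, 5]], true, false)

def Spec_select_transits (list_of_transits : List (List Int)) (list_of_visits : List (List Int)) (to_same_patch : Bool) (to_different_patch : Bool) (out : List (List Int)) : Prop := out = select_transits_alt list_of_transits list_of_visits to_same_patch to_different_patch
instance (list_of_transits : List (List Int)) (list_of_visits : List (List Int)) (to_same_patch : Bool) (to_different_patch : Bool) (out : List (List Int)) : Decidable (Spec_select_transits list_of_transits list_of_visits to_same_patch to_different_patch out) := by unfold Spec_select_transits; infer_instance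

-- ===== CLAIM (what is proved, stated in full; the proofs are below) =====
def Claim_equal_select_transits : Prop := ∀ (list_of_transits : List (List Int)) (list_of_visits : List (List Int)) (to_same_patch : Bool) (to_different_patch : Bool), Dom_select_transits list_of_transits list_of_visits to_same_patch to_different_patch → Pre_select_transits list_of_transits list_of_visits to_same_patch to_different_patch → Spec_select_transits list_of_transits list_of_visits to_same_patch to_different_patch (select_transits list_of_transits list_of_visits to_same_patch to_different_patch)

-- ===== LEMMAS AND PROOFS =====

lemma pvFindT_ge (L : List (List Int)) : ∀ fuel i, i ≤ pvFindT L fuel i := by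
  intro fuel
  induction fuel with
  | zero => intro i; simp [pvFindT]
  | succ n ih =>
    intro i
    rw [pvFindT]
    split
    · exact le_trans (by omega) (ih (i + 1))
    · exact le_rfl

lemma pvFindV_ge (L : List (List Int)) : ∀ fuel j, j ≤ pvFindV L fuel j := by
  intro fuel
  induction fuel with
  | zero => intro j; simp [pvFindV]
  | succ n ih =>
    intro j
    rw [pvFindV]
    split
    · exact le_trans (by omega) (ih (j + 1))
    · exact le_rfl

lemma pvFindT_le (L : List (List Int)) : ∀ fuel i, i ≤ L.length - 1 →
    pvFindT L fuel i ≤ L.length - 1 := by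
  intro fuel
  induction fuel with
  | zero => intro i h; simpa [pvFindT] using h
  | succ n ih =>
    intro i h
    rw [pvFindT]
    split
    case isTrue h' => exact ih (i + 1) (by omega)
    case isFalse h' => exact h

lemma pvFindT_stop (L : List (List Int)) : ∀ fuel i, L.length - 1 - i ≤ fuel →
    ¬(pvFindT L fuel i < L.length - 1 ∧ pvPatchA L ((pvFindT L fuel i : Nat) : Int) ≠ -1) := by
  intro fuel
  induction fuel with
  | zero => intro i h; simp only [pvFindT]; omega
  | succ n ih =>
    intro i h
    rw [pvFindT]
    split
    case isTrue h' => exact ih (i + 1) (by omega)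
    case isFalse h' => exact h'

lemma pvFindT_mem (L : List (List Int)) : ∀ fuel i k, i ≤ k → k < pvFindT L fuel i →
    pvPatchA L (k : Int) ≠ -1 := by
  intro fuel
  induction fuel with
  | zero => intro i k hk1 hk2; rw [pvFindT] at hk2; omega
  | succ n ih =>
    intro i k hk1 hk2
    rw [pvFindT] at hk2
    by_cases h' : i < L.length - 1 ∧ pvPatchA L (i : Int) ≠ -1
    · rw [if_pos h'] at hk2
      rcases Nat.eq_or_lt_of_le hk1 with h | h
      · subst h; exact h'.2
      · exact ih (i + 1) k h hk2
    · rw [if_neg h'] at hk2; omega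

lemma pvFindV_le (L : List (List Int)) : ∀ fuel j, j ≤ L.length →
    pvFindV L fuel j ≤ L.length := by
  intro fuel
  induction fuel with
  | zero => intro j h; simpa [pvFindV] using h
  | succ n ih =>
    intro j h
    rw [pvFindV]
    split
    case isTrue h' => exact ih (j + 1) (by omega)
    case isFalse h' => exact h

lemma pvFindV_stop (L : List (List Int)) : ∀ fuel j, L.length - j ≤ fuel →
    ¬(pvFindV L fuel j < L.length ∧ pvPatchA L ((pvFindV L fuel j : Nat) : Int) = -1) := by
  intro fuel
  induction fuel with
  | zero => intro j h; simp only [pvFindV]; omega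
  | succ n ih =>
    intro j h
    rw [pvFindV]
    split
    case isTrue h' => exact ih (j + 1) (by omega)
    case isFalse h' => exact h'

lemma pvFindV_mem (L : List (List Int)) : ∀ fuel j k, j ≤ k → k < pvFindV L fuel j →
    pvPatchA L (k : Int) = -1 := by
  intro fuel
  induction fuel with
  | zero => intro j k hk1 hk2; rw [pvFindV] at hk2; omega
  | succ n ih =>
    intro j k hk1 hk2
    rw [pvFindV] at hk2
    by_cases h' : j < L.length ∧ pvPatchA L (j : Int) = -1
    · rw [if_pos h'] at hk2
      rcases Nat.eq_or_lt_of_le hk1 with h | h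
      · subst h; exact h'.2
      · exact ih (j + 1) k h hk2
    · rw [if_neg h'] at hk2; omega

lemma pvSkipA_le (L : List (List Int)) : ∀ fuel i, i ≤ L.length - 1 →
    pvSkipA L fuel i ≤ L.length - 1 := by
  intro fuel
  induction fuel with
  | zero => intro i h; simpa [pvSkipA] using h
  | succ n ih =>
    intro i h
    rw [pvSkipA]
    split
    case isTrue h' => exact ih (i + 1) (by omega)
    case isFalse h' => exact h

lemma pvSkipA_stop (L : List (List Int)) : ∀ fuel i, L.length - 1 - i ≤ fuel →
    ¬(pvPatchA L ((pvSkipA L fuel i : Nat) : Int) = -1 ∧ pvSkipA L fuel i < L.length - 1) := by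
  intro fuel
  induction fuel with
  | zero => intro i h; simp only [pvSkipA]; omega
  | succ n ih =>
    intro i h
    rw [pvSkipA]
    split
    case isTrue h' => exact ih (i + 1) (by omega)
    case isFalse h' => exact h'

lemma pvSkipA_mem (L : List (List Int)) : ∀ fuel i k, i ≤ k → k < pvSkipA L fuel i →
    pvPatchA L (k : Int) = -1 := by
  intro fuel
  induction fuel with
  | zero => intro i k hk1 hk2; rw [pvSkipA] at hk2; omega
  | succ n ih =>
    intro i k hk1 hk2
    rw [pvSkipA] at hk2
    by_cases h' : pvPatchA L (i : Int) = -1 ∧ i < L.length - 1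
    · rw [if_pos h'] at hk2
      rcases Nat.eq_or_lt_of_le hk1 with h | h
      · subst h; exact h'.1
      · exact ih (i + 1) k h hk2
    · rw [if_neg h'] at hk2; omega

-- A's outer loop is the identity once the index has reached the last event
lemma pvMainA_stop (L : List (List Int)) (same diff : Bool) (fuel : Nat)
    (acc : List (List Int)) (i : Nat) (h : ¬ i < L.length - 1) :
    pvMainA L same diff fuel acc i = acc := by
  cases fuel with
  | zero => rfl
  | succ n => rw [pvMainA, if_neg h]

-- index bridge: pvPatchA at an in-range Nat index is pvPatchB of the element
lemma pvPatch_bridge (L : List (List Int)) (i : Nat) (h : i < L.length) :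
    pvPatchA L (i : Int) = pvPatchB L[i] := by
  simp [pvPatchA, pvPatchB, PySem.List.pyGetD_natCast, List.getD_eq_getElem?_getD,
    List.getElem?_eq_getElem h]

-- with last? = none the pending buffer never reaches the output
lemma pvGoB_none_buffer (same diff : Bool) (es : List (List Int)) :
    ∀ b out, pvGoB same diff es none b out = pvGoB same diff es none [] out := by
  induction es with
  | nil => intro b out; rfl
  | cons e rest ih =>
    intro b out
    by_cases hp : pvPatchB e = -1 <;> simp [pvGoB, hp, ih]

-- B walks through a block of visits: output unchanged, last? becomes the last one's patch
lemma pvGoB_visits (L : List (List Int)) (same diff : Bool) :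
    ∀ m i c (last? : Option Int) acc, c - i ≤ m → i < c → c ≤ L.length →
    (∀ k, i ≤ k → k < c → pvPatchA L (k : Int) ≠ -1) →
    pvGoB same diff (L.drop i) last? [] acc
      = pvGoB same diff (L.drop c) (some (pvPatchA L ((c : Int) - 1))) [] acc := by
  intro m
  induction m with
  | zero => intro i c last? acc h1 h2 h3 h4; omega
  | succ m ih =>
    intro i c last? acc h1 h2 h3 h4
    have hiL : i < L.length := by omega
    have hdrop : L.drop i = L[i] :: L.drop (i + 1) := (List.getElem_cons_drop hiL).symm
    have hpi : pvPatchB L[i] ≠ -1 := by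
      rw [← pvPatch_bridge L i hiL]; exact h4 i le_rfl h2
    rcases Nat.eq_or_lt_of_le (Nat.succ_le_of_lt h2) with hc | hc
    · -- c = i + 1
      rw [hdrop]
      simp only [pvGoB, if_neg hpi]
      have hcast : ((c : Int) - 1) = (i : Int) := by omega
      rw [hcast, pvPatch_bridge L i hiL, ← hc]
      simp
    · rw [hdrop]
      simp only [pvGoB, if_neg hpi]
      simp only [ne_eq, not_true_eq_false, if_false]
      exact ih (i + 1) c _ acc (by omega) hc h3 (fun k hk1 hk2 => h4 k (by omega) hk2)

-- B walks through a block of transits: they pile up in the buffer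
lemma pvGoB_transits (L : List (List Int)) (same diff : Bool) :
    ∀ m c j (last? : Option Int) b acc, j - c ≤ m → c ≤ j → j ≤ L.length →
    (∀ k, c ≤ k → k < j → pvPatchA L (k : Int) = -1) →
    pvGoB same diff (L.drop c) last? b acc
      = pvGoB same diff (L.drop j) last? (b ++ (L.drop c).take (j - c)) acc := by
  intro m
  induction m with
  | zero =>
    intro c j last? b acc h1 h2 h3 h4
    have : c = j := by omega
    subst this; simp
  | succ m ih =>
    intro c j last? b acc h1 h2 h3 h4
    rcases Nat.eq_or_lt_of_le h2 with hc | hc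
    · subst hc; simp
    · have hcL : c < L.length := by omega
      have hdrop : L.drop c = L[c] :: L.drop (c + 1) := (List.getElem_cons_drop hcL).symm
      have hpc : pvPatchB L[c] = -1 := by
        rw [← pvPatch_bridge L c hcL]; exact h4 c le_rfl hc
      rw [hdrop]
      simp only [pvGoB, hpc]
      rw [ih (c + 1) j last? (b ++ [L[c]]) acc (by omega) hc h3
        (fun k hk1 hk2 => h4 k (by omega) hk2)]
      have htake : (L[c] :: L.drop (c + 1)).take (j - c)
          = L[c] :: (L.drop (c + 1)).take (j - (c + 1)) := by
        have : j - c = (j - (c + 1)) + 1 := by omega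
        rw [this, List.take_succ_cons]
      rw [← hdrop] at htake ⊢
      rw [htake, List.append_assoc]
      simp

-- the central simulation: A's outer loop at index i equals B's pass over drop i L,
-- provided last? records the patch of the visit just before i whenever L[i] is a transit
lemma pvMainA_eq_pvGoB (L : List (List Int)) (same diff : Bool) :
    ∀ fuel i (last? : Option Int) acc, L.length - i ≤ fuel →
    (pvPatchA L (i : Int) = -1 →
      0 < i ∧ pvPatchA L ((i : Int) - 1) ≠ -1 ∧ last? = some (pvPatchA L ((i : Int) - 1))) →
    pvMainA L same diff fuel acc i = pvGoB same diff (L.drop i) last? [] acc := by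
  intro fuel
  induction fuel with
  | zero =>
    intro i last? acc h1 hinv
    have hle : L.length ≤ i := by omega
    rw [List.drop_eq_nil_of_le hle]
    rfl
  | succ m ih =>
    intro i last? acc h1 hinv
    by_cases hi : i < L.length - 1
    case neg =>
      rw [pvMainA, if_neg hi]
      rcases Nat.lt_or_ge i L.length with hlt | hge
      · -- i = L.length - 1 : exactly one event left, nothing reaches the output
        have hdrop : L.drop i = L[i] :: L.drop (i + 1) := (List.getElem_cons_drop hlt).symm
        have hnil : L.drop (i + 1) = [] := List.drop_eq_nil_of_le (by omega)
        rw [hdrop, hnil]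
        by_cases hp : pvPatchB L[i] = -1
        · simp [pvGoB, hp]
        · simp [pvGoB, hp]
      · rw [List.drop_eq_nil_of_le hge]; rfl
    case pos =>
      have hlen2 : 2 ≤ L.length := by omega
      rw [pvMainA, if_pos hi]
      set c := pvFindT L L.length i with hcdef
      have hcge : i ≤ c := pvFindT_ge L L.length i
      have hcle : c ≤ L.length - 1 := pvFindT_le L L.length i (by omega)
      have hcmem : ∀ k, i ≤ k → k < c → pvPatchA L (k : Int) ≠ -1 :=
        fun k => pvFindT_mem L L.length i k
      have hcstop := pvFindT_stop L L.length i (by omega)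
      rw [← hcdef] at hcstop
      by_cases hc : pvPatchA L (c : Int) = -1
      case neg =>
        -- no transit found: c = L.length - 1 is a visit; A stops with acc
        have hceq : c = L.length - 1 := by
          rcases Nat.lt_or_ge c (L.length - 1) with h | h
          · exact absurd ⟨h, hc⟩ hcstop
          · omega
        simp only [if_neg hc]
        have hicc : i < c := by omega
        rw [pvGoB_visits L same diff (c - i) i c last? acc le_rfl hicc (by omega) hcmem]
        have hcL : c < L.length := by omega
        have hdrop : L.drop c = L[c] :: L.drop (c + 1) := (List.getElem_cons_drop hcL).symm
        have hnil : L.drop (c + 1) = [] := List.drop_eq_nil_of_le (by omega)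
        have hpc : pvPatchB L[c] ≠ -1 := by rw [← pvPatch_bridge L c hcL]; exact hc
        rw [hdrop, hnil]
        simp [pvGoB, hpc]
      case pos =>
        simp only [if_pos hc]
        -- the run of transits starts at c, preceded by the visit at c - 1
        have hc0 : 0 < c := by
          rcases Nat.eq_or_lt_of_le hcge with h | h
          · exact h ▸ (hinv (h ▸ hc)).1
          · omega
        have hprev : pvPatchA L ((c : Int) - 1) ≠ -1 := by
          rcases Nat.eq_or_lt_of_le hcge with h | h
          · exact h ▸ (hinv (h ▸ hc)).2.1
          · have : ((c : Int) - 1) = ((c - 1 : Nat) : Int) := by omega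
            rw [this]; exact hcmem (c - 1) (by omega) (by omega)
        have hBtoC : pvGoB same diff (L.drop i) last? [] acc
            = pvGoB same diff (L.drop c) (some (pvPatchA L ((c : Int) - 1))) [] acc := by
          rcases Nat.eq_or_lt_of_le hcge with h | h
          · rw [← h, (hinv (h ▸ hc)).2.2]
          · exact pvGoB_visits L same diff (c - i) i c last? acc le_rfl h (by omega) hcmem
        set j := pvFindV L L.length (c + 1) with hjdef
        have hjge : c + 1 ≤ j := pvFindV_ge L L.length (c + 1)
        have hjle : j ≤ L.length := pvFindV_le L L.length (c + 1) (by omega)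
        have hjstop := pvFindV_stop L L.length (c + 1) (by omega)
        rw [← hjdef] at hjstop
        have hjmem : ∀ k, c ≤ k → k < j → pvPatchA L (k : Int) = -1 := by
          intro k hk1 hk2
          rcases Nat.eq_or_lt_of_le hk1 with h | h
          · exact h ▸ hc
          · exact pvFindV_mem L L.length (c + 1) k h hk2
        have hTB := pvGoB_transits L same diff (j - c) c j
          (some (pvPatchA L ((c : Int) - 1))) [] acc le_rfl (by omega) hjle hjmem
        simp only [List.nil_append] at hTB
        by_cases hjlen : j = L.length
        case pos =>
          -- trailing transits with no closing visit: nothing is added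
          simp only [if_neg (by simp [hjlen] : ¬ j ≠ L.length)]
          rw [pvMainA_stop L same diff m acc (j + 1) (by omega), hBtoC, hTB, hjlen,
            List.drop_eq_nil_of_le le_rfl]
          rfl
        case neg =>
          have hjL : j < L.length := by omega
          have hpj : pvPatchA L (j : Int) ≠ -1 := fun h => hjstop ⟨hjL, h⟩
          have hpjB : pvPatchB L[j] ≠ -1 := by rw [← pvPatch_bridge L j hjL]; exact hpj
          simp only [if_pos hjlen]
          -- the flush at the visit j
          have hdropj : L.drop j = L[j] :: L.drop (j + 1) := (List.getElem_cons_drop hjL).symm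
          have hbufne : (L.drop c).take (j - c) ≠ [] := by
            apply List.ne_nil_of_length_pos
            simp [List.length_take, List.length_drop]
            omega
          have hslice : PySem.List.slice L (some (c : Int)) (some (j : Int))
              = (L.drop c).take (j - c) := PySem.List.slice_natCast L c j
          have hflush : pvGoB same diff (L.drop j) (some (pvPatchA L ((c : Int) - 1)))
                ((L.drop c).take (j - c)) acc
              = pvGoB same diff (L.drop (j + 1)) (some (pvPatchB L[j])) []
                (if (same ∧ pvPatchA L ((c : Int) - 1) = pvPatchB L[j])
                    ∨ (diff ∧ pvPatchA L ((c : Int) - 1) ≠ pvPatchB L[j])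
                 then acc ++ (L.drop c).take (j - c) else acc) := by
            rw [hdropj]
            simp only [pvGoB, if_neg hpjB, if_pos hbufne]
          rw [hBtoC, hTB, hflush]
          rw [← pvPatch_bridge L j hjL]
          -- apply the induction hypothesis at j + 1
          rw [ih (j + 1) (some (pvPatchA L (j : Int))) _ (by omega) ?_]
          · congr 1
            -- A's two sequential appends equal B's single disjunctive one
            rw [hslice]
            by_cases hsd : pvPatchA L ((c : Int) - 1) = pvPatchA L (j : Int)
            · by_cases hs : same = true <;>
                simp [hsd, hs]
            · by_cases hd : diff = true <;>
                simp [hsd, hd]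
          · intro hpj1
            refine ⟨by omega, ?_, ?_⟩
            · have : ((j : Int) + 1 - 1) = (j : Int) := by omega
              simpa [this] using hpj
            · have : ((j : Int) + 1 - 1) = (j : Int) := by omega
              rw [Nat.cast_add, Nat.cast_one, this]

-- top level: the initial skip of leading transits lands in a state the simulation covers
lemma pv_central (L : List (List Int)) (same diff : Bool) :
    pvMainA L same diff L.length []
        (if pvPatchA L 0 = -1 then pvSkipA L L.length 0 else 0)
      = pvGoB same diff L none [] [] := by
  by_cases h0 : pvPatchA L 0 = -1
  case neg =>
    rw [if_neg h0]
    exact pvMainA_eq_pvGoB L same diff L.length 0 none [] (by omega)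
      (fun h => absurd (by simpa using h) h0)
  case pos =>
    have hLne : L ≠ [] := by
      intro h; subst h; exact absurd h0 (by decide)
    have hlen1 : 1 ≤ L.length := by
      cases L with
      | nil => exact absurd rfl hLne
      | cons a t => simp
    rw [if_pos h0]
    set r := pvSkipA L L.length 0 with hrdef
    have hrle : r ≤ L.length - 1 := pvSkipA_le L L.length 0 (by omega)
    have hrmem : ∀ k, k < r → pvPatchA L (k : Int) = -1 :=
      fun k hk => pvSkipA_mem L L.length 0 k (by omega) hk
    have hrstop := pvSkipA_stop L L.length 0 (by omega)
    rw [← hrdef] at hrstop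
    by_cases hr : pvPatchA L (r : Int) = -1
    case pos =>
      -- the whole list is transits: both sides return []
      have hreq : r = L.length - 1 := by
        rcases Nat.lt_or_ge r (L.length - 1) with h | h
        · exact absurd ⟨hr, h⟩ hrstop
        · omega
      have hall : ∀ k, 0 ≤ k → k < L.length → pvPatchA L (k : Int) = -1 := by
        intro k _ hk
        rcases Nat.lt_or_ge k r with h | h
        · exact hrmem k h
        · have : k = r := by omega
          rw [this]; exact hr
      rw [pvMainA_stop L same diff L.length [] r (by omega)]
      have h2 := pvGoB_transits L same diff L.length 0 L.length none [] []
        (by omega) (by omega) le_rfl hall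
      rw [List.drop_zero] at h2
      rw [h2, List.drop_length]
      rfl
    case neg =>
      rw [pvMainA_eq_pvGoB L same diff L.length r none [] (by omega)
        (fun h => absurd h hr)]
      have h2 := pvGoB_transits L same diff r 0 r none [] []
        (by omega) (by omega) (by omega) (fun k _ hk2 => hrmem k hk2)
      rw [List.drop_zero] at h2
      rw [h2]
      simp only [List.nil_append]
      exact (pvGoB_none_buffer same diff _ _ _).symm

-- ===== VERDICT (by name: the statement is the Claim_ definition above) =====
theorem select_transits_spec : Claim_equal_select_transits := by
  intro lt lv same diff _ _
  unfold Spec_select_transits select_transits select_transits_alt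
  exact pv_central _ same diff
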